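-- pv_equiv track=rewrite | github.com/RetroEvelyne/APC | helping_people/triangle_thing.py | pyramid
-- ===== SOURCE A (Python) =====
-- def layer(length: int) -> str:
--     return_str = ""
--     for i in range(length):
--         if (i % 2) == 0:
--             return_str += "*"
--         else:
--             return_str += "A"
--     return return_str
--
-- def pyramid(height:int) -> str:
--     pyramid_str = ""
--     buffer = " "*(height-1)
--     last_length = 1
--
--     for _ in range(height):
--         pyramid_str += buffer
--         buffer = buffer[:-1]
--         pyramid_str += layer(last_length)
--         last_length += 2
--         pyramid_str += "\n"
--
--     return pyramid_str
-- ===== SOURCE B (Python) =====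
-- def pyramid(height: int) -> str:
--     return "".join(
--         " " * (height - 1 - i) + "*A" * i + "*" + "\n"
--         for i in range(height)
--     )
-- ===== Notes on version B (the rewrite author's own statement) =====
-- stated objective: simpler
-- what changed: Replaces A's stateful loop (shrinking buffer string, growing odd length, per-character layer() loop) with a single join over rows whose spaces and alternating body are built in closed form by string repetition.
import Mathlib
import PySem

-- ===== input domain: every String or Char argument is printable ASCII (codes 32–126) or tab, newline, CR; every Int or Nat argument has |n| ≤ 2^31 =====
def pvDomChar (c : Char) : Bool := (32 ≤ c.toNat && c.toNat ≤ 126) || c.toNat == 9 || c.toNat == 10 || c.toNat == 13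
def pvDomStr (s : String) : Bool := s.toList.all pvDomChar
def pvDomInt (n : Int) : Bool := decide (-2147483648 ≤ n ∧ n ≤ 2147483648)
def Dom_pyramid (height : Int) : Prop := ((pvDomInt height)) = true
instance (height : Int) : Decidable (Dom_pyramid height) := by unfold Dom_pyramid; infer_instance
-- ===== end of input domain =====

-- B replaces A's stateful buffer/length loop with a closed-form row expression joined over range(height); objective: simpler.

-- ===== PORT A =====
-- helper layer(length): builds "*A*A…" character by character
def layerChars (length : Int) : List Char :=
  (PySem.List.pyRange 0 length 1).foldl
    (fun return_str i =>
      if PySem.Int.mod i 2 = 0 then return_str ++ ['*'] else return_str ++ ['A'])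
    []

-- loop body of pyramid's for-loop; state = (pyramid_str, buffer, last_length)
def pyramidStep (st : List Char × List Char × Int) (_ : Int) : List Char × List Char × Int :=
  let ps := st.1 ++ st.2.1
  let buf := PySem.List.slice st.2.1 none (some (-1))         -- buffer[:-1]
  let ps2 := ps ++ layerChars st.2.2
  (ps2 ++ ['\n'], buf, st.2.2 + 2)

def pyramid (height : Int) : String :=
  String.ofList
    ((PySem.List.pyRange 0 height 1).foldl pyramidStep
      ([], List.replicate (height - 1).toNat ' ', 1)).1

-- ===== PORT B =====
def pyramid_alt (height : Int) : String :=
  String.ofList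
    (((PySem.List.pyRange 0 height 1).map (fun i =>
        List.replicate (height - 1 - i).toNat ' '
          ++ (List.replicate i.toNat ['*', 'A']).flatten ++ ['*'] ++ ['\n'])).flatten)

-- ===== PRECONDITION & SPEC =====
def Spec_pyramid (height : Int) (out : String) : Prop := out = pyramid_alt height
instance (height : Int) (out : String) : Decidable (Spec_pyramid height out) := by unfold Spec_pyramid; infer_instance

-- ===== CLAIM (what is proved, stated in full; the proofs are below) =====
def Claim_equal_pyramid : Prop := ∀ (height : Int), Dom_pyramid height → Spec_pyramid height (pyramid height)

-- ===== LEMMAS AND PROOFS =====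

-- B's row i, as a list of characters
def rowB (h i : Int) : List Char :=
  List.replicate (h - 1 - i).toNat ' '
    ++ (List.replicate i.toNat ['*', 'A']).flatten ++ ['*'] ++ ['\n']

lemma layerChars_eq_map (n : Int) :
    layerChars n = (PySem.List.pyRange 0 n 1).map
      (fun i => if PySem.Int.mod i 2 = 0 then '*' else 'A') := by
  unfold layerChars
  have := PySem.List.foldl_append_singleton_eq_map
      (fun i => if PySem.Int.mod i 2 = 0 then '*' else 'A') (PySem.List.pyRange 0 n 1) ([] : List Char)
  simp only [List.nil_append] at this
  rw [← this]
  congr 1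
  funext acc i
  split <;> rfl

lemma layerChars_closed (k : Nat) :
    layerChars (2 * (k : Int) + 1)
      = (List.replicate k ['*', 'A']).flatten ++ ['*'] := by
  induction k with
  | zero => decide
  | succ m ih =>
    have h1 : (2 * ((m + 1 : Nat) : Int) + 1) = (2 * (m : Int) + 1) + 1 + 1 := by
      push_cast; ring
    rw [layerChars_eq_map] at *
    rw [h1,
      PySem.List.pyRange_one_succ_right (by positivity),
      PySem.List.pyRange_one_succ_right (by positivity)]
    simp only [List.map_append, List.map_cons, List.map_nil]
    rw [ih]
    have hm1 : PySem.Int.mod (2 * (m : Int) + 1) 2 = 1 := by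
      rw [PySem.Int.mod_eq_emod_of_pos (by norm_num)]; omega
    have hm2 : PySem.Int.mod (2 * (m : Int) + 1 + 1) 2 = 0 := by
      rw [PySem.Int.mod_eq_emod_of_pos (by norm_num)]; omega
    rw [hm1, hm2]
    simp [List.replicate_succ' (n := m)]

lemma loop_inv (n : Nat) : ∀ (k h : Int) (ps : List Char),
    0 ≤ k → h - k = n →
    ((PySem.List.pyRange k h 1).foldl pyramidStep
        (ps, List.replicate (h - 1 - k).toNat ' ', 2 * k + 1)).1
      = ps ++ ((PySem.List.pyRange k h 1).map (rowB h)).flatten := by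
  induction n with
  | zero =>
    intro k h ps _ hn
    rw [PySem.List.pyRange_one_eq_nil (by omega)]
    simp
  | succ m ih =>
    intro k h ps hk hn
    rw [PySem.List.pyRange_one_cons (by omega)]
    simp only [List.foldl_cons, List.map_cons, List.flatten_cons]
    have hbuf : PySem.List.slice (List.replicate (h - 1 - k).toNat ' ') none (some (-1))
        = List.replicate (h - 1 - (k + 1)).toNat ' ' := by
      rw [PySem.List.slice_to_neg_one, List.dropLast_replicate]
      congr 1; omega
    have hstep : pyramidStep (ps, List.replicate (h - 1 - k).toNat ' ', 2 * k + 1) k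
        = (ps ++ rowB h k, List.replicate (h - 1 - (k + 1)).toNat ' ', 2 * (k + 1) + 1) := by
      unfold pyramidStep rowB
      refine Prod.ext ?_ (Prod.ext ?_ ?_) <;> simp [hbuf]
      · obtain ⟨j, rfl⟩ : ∃ j : Nat, k = (j : Int) := ⟨k.toNat, by omega⟩
        rw [layerChars_closed]
        simp
      · ring
    rw [hstep, ih (k + 1) h (ps ++ rowB h k) (by omega) (by omega)]
    simp

-- ===== VERDICT (by name: the statement is the Claim_ definition above) =====
theorem pyramid_spec : Claim_equal_pyramid := by
  intro height _
  unfold Spec_pyramid pyramid pyramid_alt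
  congr 1
  by_cases hpos : 0 < height
  · have h0 : height - 1 - 0 = height - 1 := by ring
    have := loop_inv (height.toNat) 0 height [] (by omega) (by omega)
    rw [h0] at this
    simp only [mul_zero, zero_add] at this
    rw [this]
    refine congrArg List.flatten (List.map_congr_left fun i _ => ?_)
    simp [rowB, List.append_assoc]
  · rw [PySem.List.pyRange_one_eq_nil (by omega)]
    simp
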